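-- pv_equiv track=rewrite | github.com/Centrattic/global-cot | src/sentence_pathways.py | map_rollout_sentences_to_clusters
-- ===== SOURCE A (Python) =====
-- from typing import Any, Dict, List, Tuple, Set
--
-- def map_rollout_sentences_to_clusters(
--     sentences: List[str],
--     rollout_id: int,
--     index: Dict[Tuple[str, int], List[Tuple[int, int]]],
-- ) -> List[int]:
--     """Return ordered cluster ids for sentences; consumes multiplicity counts.
--
--     If a sentence is not found in any cluster for this rollout, it is skipped.
--     """
--     sequence: List[int] = []
--     for text in sentences:
--         key = (text, rollout_id)
--         if key not in index:
--             continue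
--         buckets = index[key]
--         # Pick first cluster with remaining count
--         selected_idx = -1
--         for i, (cid, cnt) in enumerate(buckets):
--             if cnt > 0:
--                 selected_idx = i
--                 break
--         if selected_idx == -1:
--             continue
--         cid, cnt = buckets[selected_idx]
--         buckets[selected_idx] = (cid, cnt - 1)
--         sequence.append(cid)
--     return sequence
-- ===== SOURCE B (Python) =====
-- def map_rollout_sentences_to_clusters(sentences, rollout_id, index):
--     """Per-key advancing pointer over a private copy of the buckets: instead of
--     rescanning the bucket list from the start for every sentence, keep for each
--     key the index of the first bucket that can still be positive and move it
--     only forward.  Unlike A, does not mutate `index` (return value is the same).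
--     """
--     state = {}  # key -> (pos, buckets copy)
--     sequence = []
--     for text in sentences:
--         key = (text, rollout_id)
--         if key not in index:
--             continue
--         if key in state:
--             pos, buckets = state[key]
--         else:
--             pos, buckets = 0, list(index[key])
--         n = len(buckets)
--         while pos < n and buckets[pos][1] <= 0:
--             pos += 1
--         if pos < n:
--             cid, cnt = buckets[pos]
--             buckets[pos] = (cid, cnt - 1)
--             sequence.append(cid)
--         state[key] = (pos, buckets)
--     return sequence
-- ===== Notes on version B (the rewrite author's own statement) =====
-- stated objective: alternative
-- what changed: B keeps, per key, a forward-moving pointer into a private copy of the bucket list (first bucket that can still be positive) instead of rescanning the buckets from index 0 for every sentence; B also leaves the caller's index unmutated (a timing run did not confirm a speed-up on the generated inputs, so no speed claim).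
import Mathlib
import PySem

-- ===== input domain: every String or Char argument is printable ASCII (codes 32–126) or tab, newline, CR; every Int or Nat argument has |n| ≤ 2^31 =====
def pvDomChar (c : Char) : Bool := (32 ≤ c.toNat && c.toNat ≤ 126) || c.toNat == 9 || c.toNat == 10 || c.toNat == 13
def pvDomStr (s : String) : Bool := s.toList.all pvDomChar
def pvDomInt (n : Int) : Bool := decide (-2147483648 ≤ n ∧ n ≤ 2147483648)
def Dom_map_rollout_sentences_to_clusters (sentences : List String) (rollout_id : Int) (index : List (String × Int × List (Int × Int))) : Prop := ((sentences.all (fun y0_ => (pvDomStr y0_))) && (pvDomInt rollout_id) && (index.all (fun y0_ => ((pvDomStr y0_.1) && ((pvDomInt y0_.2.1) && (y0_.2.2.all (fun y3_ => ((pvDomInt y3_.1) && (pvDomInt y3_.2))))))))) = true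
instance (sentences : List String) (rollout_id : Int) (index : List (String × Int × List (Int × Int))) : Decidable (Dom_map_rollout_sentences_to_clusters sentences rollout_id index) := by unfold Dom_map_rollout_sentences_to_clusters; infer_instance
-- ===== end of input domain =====

-- B replaces A's per-sentence rescan of the bucket list with a per-key forward-moving
-- pointer into a private copy of the buckets (alternative algorithm; A also mutates the
-- bucket lists inside `index` in place while B does not — the claim is about the return value).


-- ===== PORT A =====
-- the Lean `index` argument is the Python dict's item list; rebuild the dict
-- (dict construction semantics: later duplicate keys overwrite in place)
def pvBuildIndex (index : List (String × Int × List (Int × Int))) :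
    PySem.Dict (String × Int) (List (Int × Int)) :=
  index.foldl (fun d e => PySem.Dict.insert d (e.1, e.2.1) e.2.2) PySem.Dict.empty

-- `selected_idx = -1; for i, (cid, cnt) in enumerate(buckets): if cnt > 0: selected_idx = i; break`
-- (the -1 sentinel together with the `== -1` test is rendered as Option: none = -1)
def pvFindA (i : Nat) : List (Int × Int) → Option Nat
  | [] => none
  | (_, cnt) :: rest => if 0 < cnt then some i else pvFindA (i + 1) rest

-- one iteration of A's `for text in sentences` loop; state = (index dict, sequence)
def pvStepA (rollout_id : Int)
    (s : PySem.Dict (String × Int) (List (Int × Int)) × List Int) (text : String) :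
    PySem.Dict (String × Int) (List (Int × Int)) × List Int :=
  match PySem.Dict.get? s.1 (text, rollout_id) with
  | none => s
  | some buckets =>
    match pvFindA 0 buckets with
    | none => s
    | some i =>
      match buckets[i]? with
      | none => s   -- unreachable guard: i returned by the scan is always in range
      | some (cid, cnt) =>
        (PySem.Dict.insert s.1 (text, rollout_id) (buckets.set i (cid, cnt - 1)),
         s.2 ++ [cid])

def map_rollout_sentences_to_clusters (sentences : List String) (rollout_id : Int) (index : List (String × Int × List (Int × Int))) : List Int :=
  (sentences.foldl (pvStepA rollout_id) (pvBuildIndex index, [])).2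

-- ===== PORT B =====
-- `while pos < n and buckets[pos][1] <= 0: pos += 1`
def pvAdvance (buckets : List (Int × Int)) (pos : Nat) : Nat :=
  if h : pos < buckets.length then
    if buckets[pos].2 <= 0 then pvAdvance buckets (pos + 1) else pos
  else pos
termination_by buckets.length - pos

-- one iteration of B's loop; state = (per-key (pos, buckets copy) dict, sequence)
def pvStepB (index0 : PySem.Dict (String × Int) (List (Int × Int))) (rollout_id : Int)
    (s : PySem.Dict (String × Int) (Nat × List (Int × Int)) × List Int) (text : String) :
    PySem.Dict (String × Int) (Nat × List (Int × Int)) × List Int :=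
  match PySem.Dict.get? index0 (text, rollout_id) with
  | none => s
  | some bks0 =>
    let st := (PySem.Dict.get? s.1 (text, rollout_id)).getD (0, bks0)
    let pos := pvAdvance st.2 st.1
    if h : pos < st.2.length then
      (PySem.Dict.insert s.1 (text, rollout_id)
         (pos, st.2.set pos (st.2[pos].1, st.2[pos].2 - 1)),
       s.2 ++ [st.2[pos].1])
    else
      (PySem.Dict.insert s.1 (text, rollout_id) (pos, st.2), s.2)

def map_rollout_sentences_to_clusters_alt (sentences : List String) (rollout_id : Int) (index : List (String × Int × List (Int × Int))) : List Int :=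
  (sentences.foldl (pvStepB (pvBuildIndex index) rollout_id) (PySem.Dict.empty, [])).2

-- ===== PRECONDITION & SPEC =====
def Spec_map_rollout_sentences_to_clusters (sentences : List String) (rollout_id : Int) (index : List (String × Int × List (Int × Int))) (out : List Int) : Prop := out = map_rollout_sentences_to_clusters_alt sentences rollout_id index
instance (sentences : List String) (rollout_id : Int) (index : List (String × Int × List (Int × Int))) (out : List Int) : Decidable (Spec_map_rollout_sentences_to_clusters sentences rollout_id index out) := by unfold Spec_map_rollout_sentences_to_clusters; infer_instance

-- ===== CLAIM (what is proved, stated in full; the proofs are below) =====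
def Claim_equal_map_rollout_sentences_to_clusters : Prop := ∀ (sentences : List String) (rollout_id : Int) (index : List (String × Int × List (Int × Int))), Dom_map_rollout_sentences_to_clusters sentences rollout_id index → Spec_map_rollout_sentences_to_clusters sentences rollout_id index (map_rollout_sentences_to_clusters sentences rollout_id index)

-- ===== LEMMAS AND PROOFS =====

-- relation between A's state (the mutated dict) and B's state (pointer + private copy):
-- where B has no entry A's dict is untouched; where B holds (pos, bks), A's dict holds the
-- same list, pos is within bounds, everything before pos is non-positive, and the key is in index0
def pvInv (index0 d : PySem.Dict (String × Int) (List (Int × Int)))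
    (st : PySem.Dict (String × Int) (Nat × List (Int × Int))) : Prop :=
  ∀ k : String × Int,
    (PySem.Dict.get? st k = none → PySem.Dict.get? d k = PySem.Dict.get? index0 k) ∧
    (∀ pos bks, PySem.Dict.get? st k = some (pos, bks) →
       (PySem.Dict.get? index0 k).isSome = true ∧
       PySem.Dict.get? d k = some bks ∧ pos ≤ bks.length ∧
       ∀ j, j < pos → ∀ p : Int × Int, bks[j]? = some p → p.2 ≤ 0)

lemma pvFindA_shift (bks : List (Int × Int)) (i : Nat) :
    pvFindA i bks = (pvFindA 0 bks).map (· + i) := by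
  induction bks generalizing i with
  | nil => simp [pvFindA]
  | cons b rest ih =>
    obtain ⟨cid, cnt⟩ := b
    by_cases hc : 0 < cnt
    · simp [pvFindA, hc]
    · simp only [pvFindA, if_neg hc]
      rw [ih (i + 1), ih 1]
      cases pvFindA 0 rest <;> simp; omega

lemma pvFindA_none_spec (bks : List (Int × Int)) (h : pvFindA 0 bks = none) :
    ∀ j : Nat, ∀ p : Int × Int, bks[j]? = some p → p.2 ≤ 0 := by
  induction bks with
  | nil => intro j p hp; simp at hp
  | cons b rest ih =>
    intro j p hp
    obtain ⟨cid, cnt⟩ := b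
    by_cases hc : 0 < cnt
    · simp [pvFindA, hc] at h
    · simp only [pvFindA, if_neg hc] at h
      rw [pvFindA_shift rest 1] at h
      simp only [Option.map_eq_none_iff] at h
      cases j with
      | zero => simp at hp; subst hp; omega
      | succ j => exact ih h j p (by simpa using hp)

lemma pvFindA_some_spec (bks : List (Int × Int)) (i : Nat) (h : pvFindA 0 bks = some i) :
    i < bks.length ∧ (∀ p : Int × Int, bks[i]? = some p → 0 < p.2) ∧
      (∀ j, j < i → ∀ p : Int × Int, bks[j]? = some p → p.2 ≤ 0) := by
  induction bks generalizing i with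
  | nil => simp [pvFindA] at h
  | cons b rest ih =>
    obtain ⟨cid, cnt⟩ := b
    by_cases hc : 0 < cnt
    · simp [pvFindA, hc] at h
      subst h
      refine ⟨by simp, ?_, by omega⟩
      intro p hp; simp at hp; subst hp; exact hc
    · simp only [pvFindA, if_neg hc] at h
      rw [pvFindA_shift rest 1] at h
      obtain ⟨i0, h0, rfl⟩ := Option.map_eq_some_iff.mp h
      obtain ⟨h1, h2, h3⟩ := ih i0 h0
      refine ⟨by simpa using h1, ?_, ?_⟩
      · intro p hp; exact h2 p (by simpa using hp)
      · intro j hj p hp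
        cases j with
        | zero => simp at hp; subst hp; omega
        | succ j => exact h3 j (by omega) p (by simpa using hp)

lemma pvFindA_eq_some (bks : List (Int × Int)) (pos : Nat) (hlt : pos < bks.length)
    (hpre : ∀ j, j < pos → ∀ p : Int × Int, bks[j]? = some p → p.2 ≤ 0)
    (hp : 0 < bks[pos].2) : pvFindA 0 bks = some pos := by
  induction bks generalizing pos with
  | nil => simp at hlt
  | cons b rest ih =>
    obtain ⟨cid, cnt⟩ := b
    cases pos with
    | zero => simp at hp; simp [pvFindA, hp]
    | succ q =>
      have hc : ¬ 0 < cnt := by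
        have := hpre 0 (by omega) (cid, cnt) (by simp)
        simpa using this
      simp only [pvFindA, if_neg hc]
      rw [pvFindA_shift rest 1]
      rw [ih q (by simpa using hlt) ?_ (by simpa using hp)]
      · simp
      · intro j hj p hpj
        exact hpre (j + 1) (by omega) p (by simpa using hpj)

lemma pvAdvance_eq (bks : List (Int × Int)) : ∀ n pos, bks.length - pos ≤ n →
    pos ≤ bks.length →
    (∀ j, j < pos → ∀ p : Int × Int, bks[j]? = some p → p.2 ≤ 0) →
    pvAdvance bks pos = (pvFindA 0 bks).getD bks.length := by
  intro n
  induction n with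
  | zero =>
    intro pos hn hle hpre
    have hpos : pos = bks.length := by omega
    subst hpos
    rw [pvAdvance]
    simp only [lt_irrefl, dite_false]
    cases hf : pvFindA 0 bks with
    | none => simp
    | some i =>
      obtain ⟨h1, h2, _⟩ := pvFindA_some_spec bks i hf
      have := h2 bks[i] (by simp [h1])
      have := hpre i h1 bks[i] (by simp [h1])
      omega
  | succ n ih =>
    intro pos hn hle hpre
    rw [pvAdvance]
    by_cases hlt : pos < bks.length
    · simp only [dif_pos hlt]
      by_cases hz : bks[pos].2 ≤ 0
      · rw [if_pos hz]
        exact ih (pos + 1) (by omega) (by omega) (by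
          intro j hj p hpj
          by_cases hje : j = pos
          · subst hje; simp [hlt] at hpj; rw [← hpj]; exact hz
          · exact hpre j (by omega) p hpj)
      · simp only [if_neg (by omega)]
        rw [pvFindA_eq_some bks pos hlt hpre (by omega)]
        simp
    · have hpos : pos = bks.length := by omega
      subst hpos
      simp only [lt_irrefl, dite_false]
      cases hf : pvFindA 0 bks with
      | none => simp
      | some i =>
        obtain ⟨h1, h2, _⟩ := pvFindA_some_spec bks i hf
        have := h2 bks[i] (by simp [h1])
        have := hpre i h1 bks[i] (by simp [h1])
        omega

-- one synchronized step: same emitted element, invariant preserved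
lemma pvStep_rel (index0 : PySem.Dict (String × Int) (List (Int × Int))) (rid : Int)
    (d : PySem.Dict (String × Int) (List (Int × Int)))
    (st : PySem.Dict (String × Int) (Nat × List (Int × Int)))
    (hinv : pvInv index0 d st) (t : String) :
    ∃ d' st' e, pvInv index0 d' st' ∧
      (∀ acc, pvStepA rid (d, acc) t = (d', acc ++ e)) ∧
      (∀ acc, pvStepB index0 rid (st, acc) t = (st', acc ++ e)) := by
  cases hA : PySem.Dict.get? index0 (t, rid) with
  | none =>
    have hstn : PySem.Dict.get? st (t, rid) = none := by
      cases hstk : PySem.Dict.get? st (t, rid) with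
      | none => rfl
      | some v =>
        have := ((hinv (t, rid)).2 v.1 v.2 (by rw [hstk])).1
        rw [hA] at this; simp at this
    have hdn : PySem.Dict.get? d (t, rid) = none := by
      rw [(hinv (t, rid)).1 hstn, hA]
    exact ⟨d, st, [], hinv, fun acc => by simp [pvStepA, hdn],
           fun acc => by simp [pvStepB, hA]⟩
  | some bks0 =>
    obtain ⟨pos0, bks, hgd, hd, hpos, hpre⟩ :
        ∃ pos0 bks, (PySem.Dict.get? st (t, rid)).getD (0, bks0) = (pos0, bks) ∧
          PySem.Dict.get? d (t, rid) = some bks ∧ pos0 ≤ bks.length ∧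
          (∀ j : Nat, j < pos0 → ∀ p : Int × Int, bks[j]? = some p → p.2 ≤ 0) := by
      cases hstk : PySem.Dict.get? st (t, rid) with
      | none =>
        refine ⟨0, bks0, by simp, ?_, by omega, by omega⟩
        rw [(hinv (t, rid)).1 hstk, hA]
      | some v =>
        obtain ⟨_, h2, h3, h4⟩ := (hinv (t, rid)).2 v.1 v.2 (by rw [hstk])
        exact ⟨v.1, v.2, by simp, h2, h3, h4⟩
    have hadv : pvAdvance bks pos0 = (pvFindA 0 bks).getD bks.length :=
      pvAdvance_eq bks (bks.length - pos0) pos0 le_rfl hpos hpre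
    cases hf : pvFindA 0 bks with
    | none =>
      have hlen : pvAdvance bks pos0 = bks.length := by rw [hadv, hf]; rfl
      refine ⟨d, PySem.Dict.insert st (t, rid) (bks.length, bks), [], ?_,
              fun acc => by simp [pvStepA, hd, hf],
              fun acc => by simp [pvStepB, hA, hgd, hlen]⟩
      intro k'
      by_cases hk : k' = (t, rid)
      · subst hk
        refine ⟨fun hn => ?_, fun pos bks' hsome => ?_⟩
        · rw [PySem.Dict.get?_insert_self] at hn; cases hn
        · rw [PySem.Dict.get?_insert_self] at hsome
          obtain ⟨rfl, rfl⟩ : bks.length = pos ∧ bks = bks' := by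
            simpa [Prod.ext_iff] using hsome
          exact ⟨by rw [hA]; rfl, hd, le_rfl, fun j _ p hp => pvFindA_none_spec bks hf j p hp⟩
      · rw [PySem.Dict.get?_insert_of_ne _ _ hk]
        exact hinv k'
    | some i =>
      obtain ⟨hi, h2, h3⟩ := pvFindA_some_spec bks i hf
      have hadvi : pvAdvance bks pos0 = i := by rw [hadv, hf]; rfl
      have hbi : bks[i]? = some bks[i] := List.getElem?_eq_getElem hi
      refine ⟨PySem.Dict.insert d (t, rid) (bks.set i (bks[i].1, bks[i].2 - 1)),
              PySem.Dict.insert st (t, rid) (i, bks.set i (bks[i].1, bks[i].2 - 1)),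
              [bks[i].1], ?_,
              fun acc => by simp [pvStepA, hd, hf, hbi],
              fun acc => by simp [pvStepB, hA, hgd, hadvi, hi]⟩
      intro k'
      by_cases hk : k' = (t, rid)
      · subst hk
        refine ⟨fun hn => ?_, fun pos bks' hsome => ?_⟩
        · rw [PySem.Dict.get?_insert_self] at hn; cases hn
        · rw [PySem.Dict.get?_insert_self] at hsome
          obtain ⟨rfl, rfl⟩ : i = pos ∧ bks.set i (bks[i].1, bks[i].2 - 1) = bks' := by
            simpa [Prod.ext_iff] using hsome
          refine ⟨by rw [hA]; rfl, by rw [PySem.Dict.get?_insert_self], by simp; omega, ?_⟩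
          intro j hj p hp
          rw [List.getElem?_set_ne (by omega)] at hp
          exact h3 j hj p hp
      · rw [PySem.Dict.get?_insert_of_ne _ _ hk, PySem.Dict.get?_insert_of_ne _ _ hk]
        exact hinv k'

lemma pvFold_rel (index0 : PySem.Dict (String × Int) (List (Int × Int))) (rid : Int) :
    ∀ (L : List String) d st (acc : List Int), pvInv index0 d st →
      (L.foldl (pvStepA rid) (d, acc)).2 = (L.foldl (pvStepB index0 rid) (st, acc)).2 := by
  intro L
  induction L with
  | nil => intro d st acc _; rfl
  | cons t L ih =>
    intro d st acc hinv
    obtain ⟨d', st', e, hinv', hA, hB⟩ := pvStep_rel index0 rid d st hinv t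
    simp only [List.foldl, hA acc, hB acc]
    exact ih d' st' (acc ++ e) hinv'

lemma pvInv_init (index0 : PySem.Dict (String × Int) (List (Int × Int))) :
    pvInv index0 index0 PySem.Dict.empty := by
  intro k
  constructor
  · intro _; rfl
  · intro pos bks h
    rw [PySem.Dict.get?_empty] at h
    exact absurd h (by simp)

-- ===== VERDICT (by name: the statement is the Claim_ definition above) =====
theorem map_rollout_sentences_to_clusters_spec : Claim_equal_map_rollout_sentences_to_clusters := by
  intro sentences rollout_id index _
  unfold Spec_map_rollout_sentences_to_clusters
  unfold map_rollout_sentences_to_clusters map_rollout_sentences_to_clusters_alt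
  exact pvFold_rel (pvBuildIndex index) rollout_id sentences _ _ [] (pvInv_init _)
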